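-- pv_equiv track=rewrite | github.com/Matheusobruxo/APR1 | Exercicios avaliação 2/Exercicio1.py | num_pares
-- ===== SOURCE A (Python) =====
-- def num_pares(lista):
--     if lista == []:
--         return 0
--     else:
--         sublista= lista[0]
--         contador = 0
--         for num in sublista:
--             if num %2 == 0:
--                 contador+=1
--         return contador + num_pares(lista[1:])
-- ===== SOURCE B (Python) =====
-- def num_pares(lista):
--     planos = []
--     for sublista in lista:
--         planos.extend(sublista)
--     return len([n for n in planos if n % 2 == 0])
-- ===== Notes on version B (the rewrite author's own statement) =====
-- stated objective: alternative
-- what changed: Replaced head/tail recursion with slicing by two staged passes: flatten all sublists into one list, then count the evens of that flat list with a filter.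
import Mathlib
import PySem

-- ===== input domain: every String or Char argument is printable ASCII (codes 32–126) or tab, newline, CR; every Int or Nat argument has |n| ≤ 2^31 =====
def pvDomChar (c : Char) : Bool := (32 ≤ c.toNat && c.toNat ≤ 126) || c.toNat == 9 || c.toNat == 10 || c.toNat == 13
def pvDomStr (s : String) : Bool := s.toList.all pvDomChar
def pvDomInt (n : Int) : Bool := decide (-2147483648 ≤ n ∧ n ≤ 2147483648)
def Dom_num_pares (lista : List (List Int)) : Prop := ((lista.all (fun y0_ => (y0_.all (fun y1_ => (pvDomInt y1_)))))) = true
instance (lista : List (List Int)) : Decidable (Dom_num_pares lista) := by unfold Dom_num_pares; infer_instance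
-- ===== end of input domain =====

-- B replaces A's head/tail recursion with a counter by two staged passes: flatten, then filter-and-length; objective: alternative.

-- ===== PORT A =====
def num_pares (lista : List (List Int)) : Int :=
  match lista with
  | [] => 0
  | sublista :: rest =>
    -- contador = 0; for num in sublista: if num % 2 == 0: contador += 1
    let contador := sublista.foldl (fun contador num =>
      if PySem.Int.mod num 2 = 0 then contador + 1 else contador) 0
    contador + num_pares rest   -- lista[1:] is the tail

-- ===== PORT B =====
def num_pares_alt (lista : List (List Int)) : Int :=
  -- planos = []; for sublista in lista: planos.extend(sublista)
  let planos := lista.foldl (fun planos sublista => planos ++ sublista) []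
  -- len([n for n in planos if n % 2 == 0])
  ((planos.filter (fun n => PySem.Int.mod n 2 == 0)).length : Int)

-- ===== PRECONDITION & SPEC =====
def Spec_num_pares (lista : List (List Int)) (out : Int) : Prop := out = num_pares_alt lista
instance (lista : List (List Int)) (out : Int) : Decidable (Spec_num_pares lista out) := by unfold Spec_num_pares; infer_instance

-- ===== CLAIM (what is proved, stated in full; the proofs are below) =====
def Claim_equal_num_pares : Prop := ∀ (lista : List (List Int)), Dom_num_pares lista → Spec_num_pares lista (num_pares lista)

-- ===== LEMMAS AND PROOFS =====
theorem num_pares_foldl_append (lista : List (List Int)) (acc : List Int) :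
    lista.foldl (fun planos sublista => planos ++ sublista) acc = acc ++ lista.flatten := by
  induction lista generalizing acc with
  | nil => simp
  | cons s rest ih => simp [ih, List.append_assoc]

theorem num_pares_count (s : List Int) (c : Int) :
    s.foldl (fun contador num =>
      if PySem.Int.mod num 2 = 0 then contador + 1 else contador) c
      = c + ((s.filter (fun n => PySem.Int.mod n 2 == 0)).length : Int) := by
  induction s generalizing c with
  | nil => simp
  | cons x xs ih =>
    simp only [List.foldl_cons, List.filter_cons]
    by_cases h : PySem.Int.mod x 2 = 0
    · have hb : (PySem.Int.mod x 2 == 0) = true := by rw [beq_iff_eq]; exact h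
      rw [if_pos h, ih (c + 1), hb]
      simp only [if_true, List.length_cons]
      push_cast
      ring
    · have hb : (PySem.Int.mod x 2 == 0) = false := by simp only [beq_eq_false_iff_ne, ne_eq]; exact h
      rw [if_neg h, ih c, hb]
      simp

theorem num_pares_eq (lista : List (List Int)) :
    num_pares lista = num_pares_alt lista := by
  induction lista with
  | nil => rfl
  | cons s rest ih =>
    simp only [num_pares, num_pares_alt, num_pares_foldl_append, List.nil_append,
      List.flatten_cons, List.filter_append, List.length_append] at *
    rw [num_pares_count s 0, ih]
    push_cast
    ring

-- ===== VERDICT (by name: the statement is the Claim_ definition above) =====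
theorem num_pares_spec : Claim_equal_num_pares := by
  intro lista _
  exact num_pares_eq lista
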